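-- pv_equiv track=rewrite | github.com/vboot2/python-dsa-mastery | day101_graph_greedy/practice_solutions.py | solve
-- ===== SOURCE A (Python) =====
-- from typing import List
--
-- def solve(row: List[int]) -> int:
--     """
--     Union-Find solution: each couple forms a node,
--     unions form connected components, swaps = n - components.
--     """
--     n = len(row) // 2
--     parent = list(range(n))
--
--     def find(x):
--         if parent[x] != x:
--             parent[x] = find(parent[x])
--         return parent[x]
--
--     def union(a, b):
--         parent[find(a)] = find(b)
--
--     for i in range(0, len(row), 2):
--         a, b = row[i] // 2, row[i + 1] // 2
--         union(a, b)
--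
--     components = len({find(i) for i in range(n)})
--     return n - components
-- ===== SOURCE B (Python) =====
-- from typing import List
--
-- def solve(row: List[int]) -> int:
--     """
--     Label-propagation solution: keep a label per couple; for each seat pair
--     merge the two couples' label classes by a full relabel; the answer is
--     n minus the number of distinct labels left.
--     """
--     n = len(row) // 2
--     lbl = list(range(n))
--     for i in range(0, len(row), 2):
--         a, b = lbl[row[i] // 2], lbl[row[i + 1] // 2]
--         if a != b:
--             lbl = [a if v == b else v for v in lbl]
--     return n - len(set(lbl))
-- ===== Notes on version B (the rewrite author's own statement) =====
-- stated objective: alternative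
-- what changed: Replaces the recursive union-find with path compression (parent forest, find/union, set of roots) by a flat label-propagation scheme: one label per couple, each seat pair merges two label classes by a full relabel pass, and the answer is n minus the number of distinct labels.
import Mathlib
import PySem

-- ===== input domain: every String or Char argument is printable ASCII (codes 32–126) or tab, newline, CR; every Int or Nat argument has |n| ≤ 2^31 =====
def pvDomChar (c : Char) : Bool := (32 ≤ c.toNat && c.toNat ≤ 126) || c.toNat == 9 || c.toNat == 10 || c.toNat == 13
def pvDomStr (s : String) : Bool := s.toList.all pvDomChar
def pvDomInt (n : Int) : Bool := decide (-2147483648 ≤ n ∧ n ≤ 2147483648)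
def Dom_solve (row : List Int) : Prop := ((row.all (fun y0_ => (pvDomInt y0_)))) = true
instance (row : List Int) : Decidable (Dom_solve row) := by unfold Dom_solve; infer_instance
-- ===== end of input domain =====

-- B replaces A's recursive union-find by a flat label-propagation pass (no parent forest);
-- objective: alternative algorithm of the same answer; A mutates no argument, B neither.

-- ===== PORT A =====
-- find(x): recursive with path compression; the Nat fuel only bounds the recursion depth
-- (the real recursion always terminates within parent.length steps on inputs satisfying
-- Pre_solve; the fuel passed below, row.length + 2, is proved never to run out there).
def pvFind : Nat → List Int → Int → List Int × Int
  | 0, p, x => (p, x)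
  | f+1, p, x =>
      let px := PySem.List.pyGetD p x 0
      if px = x then (p, x)
      else
        let fr := pvFind f p px
        (PySem.List.pySetD fr.1 x fr.2, fr.2)

-- union(a, b): parent[find(a)] = find(b)  (Python evaluates the right-hand side first)
def pvUnion (fuel : Nat) (p : List Int) (a b : Int) : List Int :=
  let fb := pvFind fuel p b
  let fa := pvFind fuel fb.1 a
  PySem.List.pySetD fa.1 fa.2 fb.2

-- one iteration of A's edge loop: a, b = row[i] // 2, row[i+1] // 2; union(a, b)
def pvAEdge (row : List Int) (fuel : Nat) (p : List Int) (i : Int) : List Int :=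
  pvUnion fuel p (PySem.Int.floordiv (PySem.List.pyGetD row i 0) 2)
                 (PySem.Int.floordiv (PySem.List.pyGetD row (i+1) 0) 2)

def solve (row : List Int) : Int :=
  let n : Nat := row.length / 2
  let fuel : Nat := row.length + 2
  let parent : List Int := (List.range n).map (fun k => Int.ofNat k)
  let parent := (PySem.List.pyRange 0 (PySem.List.len row) 2).foldl (pvAEdge row fuel) parent
  -- components = len({find(i) for i in range(n)}) : find keeps mutating parent while counting
  let st := (List.range n).foldl (fun (st : List Int × PySem.Set Int) (i : Nat) =>
      let fr := pvFind fuel st.1 (i : Int)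
      (fr.1, PySem.Set.add st.2 fr.2)) (parent, PySem.Set.empty)
  (n : Int) - PySem.Set.len st.2

-- ===== PORT B =====
-- one iteration of B's loop: read the two labels, merge the classes by a full relabel
def pvBEdge (row : List Int) (l : List Int) (i : Int) : List Int :=
  let a := PySem.List.pyGetD l (PySem.Int.floordiv (PySem.List.pyGetD row i 0) 2) 0
  let b := PySem.List.pyGetD l (PySem.Int.floordiv (PySem.List.pyGetD row (i+1) 0) 2) 0
  if a ≠ b then l.map (fun v => if v = b then a else v) else l

def solve_alt (row : List Int) : Int :=
  let n : Nat := row.length / 2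
  let lbl : List Int := (List.range n).map (fun k => Int.ofNat k)
  let lbl := (PySem.List.pyRange 0 (PySem.List.len row) 2).foldl (pvBEdge row) lbl
  (n : Int) - PySem.Set.len (PySem.Set.ofList lbl)

-- ===== PRECONDITION & SPEC =====
-- Pre_ is exactly the set of inputs where the Python A returns normally: an odd length or a
-- value outside [-len(row), len(row)) makes A's parent[...] raise IndexError (B returns too
-- on every input Pre_ admits).
def Pre_solve (row : List Int) : Prop :=
  row.length % 2 = 0 ∧ ∀ x ∈ row, -(row.length : Int) ≤ x ∧ x < (row.length : Int)
instance (row : List Int) : Decidable (Pre_solve row) := by unfold Pre_solve; infer_instance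

def pvWitness_solve : List Int := [0, 2, 1, 3]

def Spec_solve (row : List Int) (out : Int) : Prop := out = solve_alt row
instance (row : List Int) (out : Int) : Decidable (Spec_solve row out) := by unfold Spec_solve; infer_instance

-- ===== CLAIM (what is proved, stated in full; the proofs are below) =====
def Claim_equal_solve : Prop := ∀ (row : List Int), Dom_solve row → Pre_solve row → Spec_solve row (solve row)

-- ===== LEMMAS AND PROOFS =====

-- normalised (Python) index into a list of length n, for -n ≤ x < n
def pvIx (n : Nat) (x : Int) : Nat := if 0 ≤ x then x.toNat else n - (-x).toNat

-- x's chase through parent p reaches root r in k steps (finite derivation = termination)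
inductive pvRooted (p : List Int) : Nat → Nat → Nat → Prop
  | self (x : Nat) : p.getD x 0 = (x : Int) → pvRooted p x x 0
  | step (x y r k : Nat) : p.getD x 0 = (y : Int) → y ≠ x → pvRooted p y r k → pvRooted p x r (k+1)

def pvValid (n : Nat) (p : List Int) : Prop :=
  p.length = n ∧ ∀ i : Nat, i < n → ∃ m : Nat, m < n ∧ p.getD i (0:Int) = (m : Int)

-- number of non-root cells: every chase depth stays bounded by it
def pvNR (p : List Int) : Nat :=
  ((Finset.range p.length).filter (fun x => p.getD x (0:Int) ≠ (x:Int))).card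

def pvTotal (n : Nat) (p : List Int) : Prop :=
  ∀ x : Nat, x < n → ∃ r k, pvRooted p x r k ∧ k ≤ pvNR p

noncomputable def pvRootF (p : List Int) (x : Nat) : Nat :=
  @dite _ (∃ r k, pvRooted p x r k) (Classical.propDecidable _) (fun h => h.choose) (fun _ => 0)

-- joint invariant of A's parent and B's label list
def pvJInv (n : Nat) (p l : List Int) : Prop :=
  pvValid n p ∧ pvTotal n p ∧ l.length = n ∧
  (∀ x y : Nat, x < n → y < n → (l.getD x 0 = l.getD y 0 ↔ pvRootF p x = pvRootF p y))

lemma pvRooted_det {p : List Int} {x r k r' k' : Nat}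
    (h : pvRooted p x r k) (h' : pvRooted p x r' k') : r = r' ∧ k = k' := by
  induction h generalizing r' k' with
  | self x hx =>
      cases h' with
      | self => exact ⟨rfl, rfl⟩
      | step _ y _ _ hxy hne _ =>
          rw [hx] at hxy
          exact absurd (by exact_mod_cast hxy.symm) hne
  | step x y r k hxy hne h2 ih =>
      cases h' with
      | self =>
          rename_i hx'
          rw [hxy] at hx'
          exact absurd (by exact_mod_cast hx') hne
      | step _ y' _ k'' hxy' hne' h2' =>
          have hy : y = y' := by rw [hxy] at hxy'; exact_mod_cast hxy'
          subst hy
          obtain ⟨hr, hk⟩ := ih h2'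
          exact ⟨hr, by omega⟩

lemma pvRooted_root_fix {p : List Int} {x r k : Nat} (h : pvRooted p x r k) :
    p.getD r 0 = (r : Int) := by
  induction h with
  | self x hx => exact hx
  | step x y r k _ _ _ ih => exact ih

lemma pvRooted_bound {n : Nat} {p : List Int} {x r k : Nat} (hv : pvValid n p)
    (hx : x < n) (h : pvRooted p x r k) : r < n := by
  induction h with
  | self x _ => exact hx
  | step x y r k hxy _ _ ih =>
      obtain ⟨m, hm, hpm⟩ := hv.2 x hx
      have : y = m := by rw [hxy] at hpm; exact_mod_cast hpm
      exact ih (this ▸ hm)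

lemma pvRootF_eq {p : List Int} {x r k : Nat} (h : pvRooted p x r k) : pvRootF p x = r := by
  have hex : ∃ r k, pvRooted p x r k := ⟨r, k, h⟩
  rw [pvRootF, dif_pos hex]
  obtain ⟨k', h'⟩ := hex.choose_spec
  exact (pvRooted_det h' h).1

lemma pvGetD_set (p : List Int) (y : Nat) (v : Int) (i : Nat) (d : Int) :
    (p.set y v).getD i d = if i = y ∧ y < p.length then v else p.getD i d := by
  simp only [List.getD_eq_getElem?_getD, List.getElem?_set]
  by_cases h1 : i = y
  · subst h1
    by_cases h2 : i < p.length <;> simp [h2]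
  · rw [if_neg (fun h => h1 h.symm)]
    simp [h1]

lemma pvSet_same {p : List Int} {i : Nat} {v : Int} (h : p.getD i 0 = v) (hi : i < p.length) :
    p.set i v = p := by
  apply List.ext_getElem (by simp)
  intro j hj hj'
  rw [List.getElem_set]
  split
  · next heq =>
      subst heq
      rw [List.getD_eq_getElem?_getD, List.getElem?_eq_getElem hi] at h
      simpa using h.symm
  · rfl

lemma pvIx_lt {n : Nat} {x : Int} (_h1 : -(n:Int) ≤ x) (h2 : x < n) (hn : 0 < n) : pvIx n x < n := by
  unfold pvIx; split <;> omega

lemma pvGetD_bridge (p : List Int) (n : Nat) (x : Int) (d : Int) (hl : p.length = n)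
    (h1 : -(n:Int) ≤ x) (h2 : x < n) :
    PySem.List.pyGetD p x d = p.getD (pvIx n x) d := by
  subst hl
  simp only [PySem.List.pyGetD, PySem.List.pyGet?, PySem.List.pyIdx?, pvIx]
  by_cases hx : 0 ≤ x
  · rw [if_pos hx, if_pos hx, if_pos (show x < (p.length:Int) by omega)]
    simp [List.getD_eq_getElem?_getD]
  · rw [if_neg hx, if_neg hx, if_pos (show -(p.length:Int) ≤ x by omega)]
    simp [List.getD_eq_getElem?_getD]

lemma pvSetD_bridge (p : List Int) (n : Nat) (x : Int) (v : Int) (hl : p.length = n)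
    (h1 : -(n:Int) ≤ x) (h2 : x < n) :
    PySem.List.pySetD p x v = p.set (pvIx n x) v := by
  subst hl
  simp only [PySem.List.pySetD, PySem.List.pySet?, PySem.List.pyIdx?, pvIx]
  by_cases hx : 0 ≤ x
  · rw [if_pos hx, if_pos hx, if_pos (show x < (p.length:Int) by omega)]
    simp
  · rw [if_neg hx, if_neg hx, if_pos (show -(p.length:Int) ≤ x by omega)]
    simp

lemma pvNR_le (p : List Int) : pvNR p ≤ p.length := by
  calc pvNR p ≤ (Finset.range p.length).card := Finset.card_filter_le _ _
  _ = p.length := Finset.card_range _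

-- path-compression write: set a non-root cell to its own root; classes and pvNR unchanged
lemma pvCompress {n : Nat} {p : List Int} {y ry ky : Nat}
    (hv : pvValid n p) (hy : y < n) (hnr : p.getD y 0 ≠ (y:Int)) (hr : pvRooted p y ry ky) :
    pvValid n (p.set y (ry:Int)) ∧ pvNR (p.set y (ry:Int)) = pvNR p ∧
    (∀ z r k, pvRooted p z r k → ∃ k' ≤ k, pvRooted (p.set y (ry:Int)) z r k') := by
  have hlen : p.length = n := hv.1
  have hy' : y < p.length := by omega
  have hry : ry < n := pvRooted_bound hv hy hr
  have hfix : p.getD ry 0 = (ry:Int) := pvRooted_root_fix hr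
  have hryy : ry ≠ y := fun h => hnr (by rw [← h]; exact_mod_cast hfix)
  have hget : ∀ i d, (p.set y (ry:Int)).getD i d = if i = y then (ry:Int) else p.getD i d := by
    intro i d
    rw [pvGetD_set]
    by_cases h : i = y <;> simp [h, hy']
  refine ⟨⟨by simpa using hlen, ?_⟩, ?_, ?_⟩
  · intro i hi
    rw [hget]
    by_cases h : i = y
    · exact ⟨ry, hry, by rw [if_pos h]⟩
    · obtain ⟨m, hm, hpm⟩ := hv.2 i hi
      exact ⟨m, hm, by rw [if_neg h]; exact hpm⟩
  · unfold pvNR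
    rw [List.length_set]
    apply congrArg
    apply Finset.filter_congr
    intro i hi
    rw [hget]
    by_cases h : i = y
    · subst h
      rw [if_pos rfl]
      constructor <;> intro _
      · exact hnr
      · exact fun hc => hryy (by exact_mod_cast hc)
    · rw [if_neg h]
  · intro z r k h
    induction h with
    | self z hz =>
        refine ⟨0, le_refl _, pvRooted.self z ?_⟩
        rw [hget]
        have hzy : z ≠ y := fun hc => hnr (hc ▸ hz)
        rw [if_neg hzy]; exact hz
    | step z w r k hzw hne h2 ih =>
        obtain ⟨k', hk', hw⟩ := ih
        by_cases hz : z = y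
        · subst hz
          refine ⟨1, by omega, ?_⟩
          rw [(pvRooted_det (pvRooted.step z w r k hzw hne h2) hr).1]
          exact pvRooted.step z ry ry 0 (by rw [hget, if_pos rfl]) hryy
            (pvRooted.self ry (by rw [hget, if_neg hryy]; exact hfix))
        · exact ⟨k' + 1, by omega,
            pvRooted.step z w r k' (by rw [hget, if_neg hz]; exact hzw) hne hw⟩

-- union write: redirect root ra to root rb (ra ≠ rb)
lemma pvUnionSet {n : Nat} {p : List Int} {ra rb : Nat}
    (hv : pvValid n p) (hra : ra < n) (hrb : rb < n)
    (ha : p.getD ra 0 = (ra:Int)) (hb : p.getD rb 0 = (rb:Int)) (hne : ra ≠ rb) :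
    pvValid n (p.set ra (rb:Int)) ∧ pvNR (p.set ra (rb:Int)) = pvNR p + 1 ∧
    (∀ z r k, pvRooted p z r k →
      ∃ k' ≤ k + 1, pvRooted (p.set ra (rb:Int)) z (if r = ra then rb else r) k') := by
  have hlen : p.length = n := hv.1
  have hra' : ra < p.length := by omega
  have hget : ∀ i d, (p.set ra (rb:Int)).getD i d = if i = ra then (rb:Int) else p.getD i d := by
    intro i d
    rw [pvGetD_set]
    by_cases h : i = ra <;> simp [h, hra']
  have hrbfix : (p.set ra (rb:Int)).getD rb 0 = (rb:Int) := by
    rw [hget, if_neg (fun h => hne h.symm)]; exact hb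
  refine ⟨⟨by simpa using hlen, ?_⟩, ?_, ?_⟩
  · intro i hi
    rw [hget]
    by_cases h : i = ra
    · exact ⟨rb, hrb, by rw [if_pos h]⟩
    · obtain ⟨m, hm, hpm⟩ := hv.2 i hi
      exact ⟨m, hm, by rw [if_neg h]; exact hpm⟩
  · unfold pvNR
    rw [List.length_set]
    have hmem : ra ∈ Finset.range p.length := Finset.mem_range.mpr hra'
    have hsplit : (Finset.range p.length).filter
        (fun x => (p.set ra (rb:Int)).getD x (0:Int) ≠ (x:Int)) =
        insert ra ((Finset.range p.length).filter (fun x => p.getD x (0:Int) ≠ (x:Int))) := by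
      ext i
      simp only [Finset.mem_filter, Finset.mem_insert, Finset.mem_range]
      rw [hget]
      by_cases h : i = ra
      · subst h
        rw [if_pos rfl]
        simp only [true_or, iff_true]
        exact ⟨hra', fun hc => hne (by exact_mod_cast hc.symm)⟩
      · rw [if_neg h]
        constructor
        · intro ⟨h1, h2⟩; exact Or.inr ⟨h1, h2⟩
        · rintro (hc | ⟨h1, h2⟩)
          · exact absurd hc h
          · exact ⟨h1, h2⟩
    rw [hsplit, Finset.card_insert_of_notMem]
    simp only [Finset.mem_filter, not_and, Decidable.not_not]
    intro _
    exact ha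
  · intro z r k h
    induction h with
    | self z hz =>
        by_cases hz' : z = ra
        · subst hz'
          refine ⟨1, by omega, ?_⟩
          rw [if_pos rfl]
          exact pvRooted.step z rb rb 0 (by rw [hget, if_pos rfl]) (fun h => hne h.symm)
            (pvRooted.self rb hrbfix)
        · refine ⟨0, by omega, ?_⟩
          rw [if_neg hz']
          exact pvRooted.self z (by rw [hget, if_neg hz']; exact hz)
    | step z w r k hzw hnez h2 ih =>
        have hz' : z ≠ ra := by
          intro hc; subst hc
          rw [ha] at hzw
          exact hnez (by exact_mod_cast hzw.symm)
        obtain ⟨k', hk', hw⟩ := ih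
        exact ⟨k' + 1, by omega,
          pvRooted.step z w _ k' (by rw [hget, if_neg hz']; exact hzw) hnez hw⟩

-- master lemma for pvFind
lemma pvFind_spec : ∀ (k : Nat) (p : List Int) (x : Int) (r : Nat) (f n : Nat),
    pvValid n p → -(n:Int) ≤ x → x < n → pvRooted p (pvIx n x) r k → k + 2 ≤ f →
    (pvFind f p x).2 = (r : Int) ∧
    pvValid n (pvFind f p x).1 ∧ pvNR (pvFind f p x).1 = pvNR p ∧
    (∀ z r' k', pvRooted p z r' k' → ∃ k'' ≤ k', pvRooted (pvFind f p x).1 z r' k'') := by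
  intro k
  induction k using Nat.strong_induction_on with
  | _ k ih =>
  intro p x r f n hv h1 h2 hroot hf
  have hn : 0 < n := by omega
  have hlen : p.length = n := hv.1
  have hixlt : pvIx n x < n := pvIx_lt h1 h2 hn
  obtain ⟨f', rfl⟩ : ∃ f', f = f' + 1 := ⟨f - 1, by omega⟩
  cases hroot with
  | self =>
      rename_i hfix
      by_cases hxs : 0 ≤ x
      · have hcast : (↑(pvIx n x) : Int) = x := by unfold pvIx; rw [if_pos hxs]; omega
        have hpx : PySem.List.pyGetD p x 0 = x := by
          rw [pvGetD_bridge p n x 0 hlen h1 h2, hfix, hcast]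
        have heq : pvFind (f' + 1) p x = (p, x) := by
          simp only [pvFind]
          rw [hpx, if_pos rfl]
        rw [heq]
        exact ⟨hcast.symm, hv, rfl, fun z r' k' h => ⟨k', le_refl _, h⟩⟩
      · have hpx : PySem.List.pyGetD p x 0 = (↑(pvIx n x) : Int) := by
          rw [pvGetD_bridge p n x 0 hlen h1 h2, hfix]
        have hpxne : (↑(pvIx n x) : Int) ≠ x := by
          have : (0:Int) ≤ ↑(pvIx n x) := by positivity
          omega
        obtain ⟨f'', rfl⟩ : ∃ f'', f' = f'' + 1 := ⟨f' - 1, by omega⟩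
        have hg : PySem.List.pyGetD p (↑(pvIx n x) : Int) 0 = (↑(pvIx n x) : Int) := by
          rw [PySem.List.pyGetD_natCast]
          exact hfix
        have hset : PySem.List.pySetD p x (↑(pvIx n x) : Int) = p := by
          rw [pvSetD_bridge p n x _ hlen h1 h2]
          exact pvSet_same hfix (by omega)
        have heq : pvFind (f'' + 1 + 1) p x = (p, (↑(pvIx n x) : Int)) := by
          simp only [pvFind]
          rw [hpx, if_neg hpxne, hg, if_pos rfl, hset]
        rw [heq]
        exact ⟨rfl, hv, rfl, fun z r' k' h => ⟨k', le_refl _, h⟩⟩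
  | step =>
      rename_i y k0 hpxy hne hrest
      have hylt : y < n := by
        obtain ⟨m, hm, hpm⟩ := hv.2 (pvIx n x) hixlt
        have : y = m := by rw [hpxy] at hpm; exact_mod_cast hpm
        omega
      have hpx : PySem.List.pyGetD p x 0 = (↑y : Int) := by
        rw [pvGetD_bridge p n x 0 hlen h1 h2, hpxy]
      have hpxne : (↑y : Int) ≠ x := by
        by_cases hxs : 0 ≤ x
        · intro hc
          apply hne
          have : pvIx n x = x.toNat := by unfold pvIx; rw [if_pos hxs]
          omega
        · intro hc; omega
      have hixy : pvIx n (↑y : Int) = y := by unfold pvIx; rw [if_pos (by positivity)]; omega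
      have hcall := ih k0 (by omega) p (↑y : Int) r f' n hv (by omega)
        (by exact_mod_cast hylt) (by rw [hixy]; exact hrest) (by omega)
      obtain ⟨hval, hv1, hNR1, hT1⟩ := hcall
      have heq : pvFind (f' + 1) p x =
          ((pvFind f' p (↑y : Int)).1.set (pvIx n x) ((r : Nat) : Int), ((r : Nat) : Int)) := by
        simp only [pvFind]
        rw [hpx, if_neg hpxne, hval, pvSetD_bridge _ n x _ hv1.1 h1 h2]
      have horig : pvRooted p (pvIx n x) r (k0 + 1) := pvRooted.step _ y r k0 hpxy hne hrest
      obtain ⟨k1, hk1, hchain1⟩ := hT1 _ r (k0 + 1) horig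
      have hrne : r ≠ pvIx n x := by
        intro hc
        have hfx : p.getD r 0 = (r : Int) := pvRooted_root_fix hrest
        rw [hc, hpxy] at hfx
        exact hne (by exact_mod_cast hfx)
      have hnr1 : (pvFind f' p (↑y : Int)).1.getD (pvIx n x) 0 ≠ (↑(pvIx n x) : Int) := by
        intro hc
        have hself : pvRooted (pvFind f' p (↑y : Int)).1 (pvIx n x) (pvIx n x) 0 :=
          pvRooted.self _ hc
        exact hrne (pvRooted_det hchain1 hself).1
      obtain ⟨hv2, hNR2, hT2⟩ := pvCompress hv1 hixlt hnr1 hchain1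
      rw [heq]
      refine ⟨rfl, hv2, by rw [hNR2, hNR1], ?_⟩
      intro z r' k' h
      obtain ⟨ka, hka, hcha⟩ := hT1 z r' k' h
      obtain ⟨kb, hkb, hchb⟩ := hT2 z r' ka hcha
      exact ⟨kb, by omega, hchb⟩

-- roots are pointwise preserved whenever every derivation transfers
lemma pvRootF_preserved {n : Nat} {p q : List Int} (ht : pvTotal n p)
    (hpr : ∀ z r k, pvRooted p z r k → ∃ k' ≤ k, pvRooted q z r k') {x : Nat} (hx : x < n) :
    pvRootF q x = pvRootF p x := by
  obtain ⟨r, k, h, _⟩ := ht x hx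
  obtain ⟨k', _, h'⟩ := hpr x r k h
  rw [pvRootF_eq h', pvRootF_eq h]

lemma pvGetD_map_if (l : List Int) (a b : Int) (x : Nat) (hx : x < l.length) :
    (l.map (fun v => if v = b then a else v)).getD x 0 =
      (if l.getD x 0 = b then a else l.getD x 0) := by
  simp [List.getD_eq_getElem?_getD, List.getElem?_eq_getElem hx]

lemma pvRelabel_iff {a b u v : Int} (hab : a ≠ b) :
    ((if u = b then a else u) = (if v = b then a else v)) ↔
      (u = v ∨ (u = b ∧ v = a) ∨ (u = a ∧ v = b)) := by
  split_ifs <;> aesop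

lemma pvMerge_iff {ra rb ru rv : Nat} (hab : ra ≠ rb) :
    ((if ru = ra then rb else ru) = (if rv = ra then rb else rv)) ↔
      (ru = rv ∨ (ru = ra ∧ rv = rb) ∨ (ru = rb ∧ rv = ra)) := by
  split_ifs <;> aesop

-- one edge step preserves the joint invariant
lemma pvEdge_step {n : Nat} {p l row : List Int} {i : Int}
    (hrow : row.length = 2 * n)
    (hpre : ∀ x ∈ row, -(row.length : Int) ≤ x ∧ x < (row.length : Int))
    (hi0 : 0 ≤ i) (hi1 : i + 1 < (row.length : Int))
    (hJ : pvJInv n p l) :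
    pvJInv n (pvAEdge row (row.length + 2) p i) (pvBEdge row l i) := by
  obtain ⟨hvp, htp, hll, hiff⟩ := hJ
  have hlen : p.length = n := hvp.1
  have hn : 0 < n := by omega
  have hNRp : pvNR p ≤ n := hlen ▸ pvNR_le p
  -- the two seat values and couple indices
  obtain ⟨hva1, hva2⟩ := hpre _ (PySem.List.pyGetD_mem row (i := i) 0 ⟨by omega, by omega⟩)
  obtain ⟨hvb1, hvb2⟩ := hpre _ (PySem.List.pyGetD_mem row (i := i + 1) 0 ⟨by omega, by omega⟩)
  set va := PySem.List.pyGetD row i 0 with hva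
  set vb := PySem.List.pyGetD row (i+1) 0 with hvb
  set xa := PySem.Int.floordiv va 2 with hxa
  set xb := PySem.Int.floordiv vb 2 with hxb
  have hxa1 : -(n:Int) ≤ xa := by
    rw [hxa, PySem.Int.le_floordiv_iff_mul_le (by omega)]; omega
  have hxa2 : xa < (n:Int) := by
    rw [hxa, PySem.Int.floordiv_lt_iff_lt_mul (by omega)]; omega
  have hxb1 : -(n:Int) ≤ xb := by
    rw [hxb, PySem.Int.le_floordiv_iff_mul_le (by omega)]; omega
  have hxb2 : xb < (n:Int) := by
    rw [hxb, PySem.Int.floordiv_lt_iff_lt_mul (by omega)]; omega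
  have hia : pvIx n xa < n := pvIx_lt hxa1 hxa2 hn
  have hib : pvIx n xb < n := pvIx_lt hxb1 hxb2 hn
  -- find(b) on p
  obtain ⟨rb0, kb, hbch, hkb⟩ := htp (pvIx n xb) hib
  obtain ⟨hbval, hv1, hNR1, hT1⟩ :=
    pvFind_spec kb p xb rb0 (row.length + 2) n hvp hxb1 hxb2 hbch (by omega)
  set p1 := (pvFind (row.length + 2) p xb).1 with hp1
  -- find(a) on p1
  obtain ⟨ra0, ka, hach, hka⟩ := htp (pvIx n xa) hia
  obtain ⟨ka', hka', hach1⟩ := hT1 _ _ _ hach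
  obtain ⟨haval, hv2, hNR2, hT2⟩ :=
    pvFind_spec ka' p1 xa ra0 (row.length + 2) n hv1 hxa1 hxa2 hach1 (by omega)
  set p2 := (pvFind (row.length + 2) p1 xa).1 with hp2
  have hT21 : ∀ z r k, pvRooted p z r k → ∃ k' ≤ k, pvRooted p2 z r k' := by
    intro z r k h
    obtain ⟨k1, hk1, h1⟩ := hT1 z r k h
    obtain ⟨k2, hk2, h2⟩ := hT2 z r k1 h1
    exact ⟨k2, by omega, h2⟩
  have hra0 : ra0 < n := pvRooted_bound hvp hia hach
  have hrb0 : rb0 < n := pvRooted_bound hvp hib hbch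
  have hfa : p2.getD ra0 0 = (ra0 : Int) := by
    obtain ⟨k2, _, h2⟩ := hT21 ra0 ra0 0 (pvRooted.self _ (pvRooted_root_fix hach))
    exact pvRooted_root_fix h2
  have hfb : p2.getD rb0 0 = (rb0 : Int) := by
    obtain ⟨k2, _, h2⟩ := hT21 rb0 rb0 0 (pvRooted.self _ (pvRooted_root_fix hbch))
    exact pvRooted_root_fix h2
  have hrfa : pvRootF p (pvIx n xa) = ra0 := pvRootF_eq hach
  have hrfb : pvRootF p (pvIx n xb) = rb0 := pvRootF_eq hbch
  have hrP : ∀ z, z < n → pvRootF p2 z = pvRootF p z := fun z hz =>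
    pvRootF_preserved htp hT21 hz
  -- the results of the two programs' steps
  have hAres : pvAEdge row (row.length + 2) p i = p2.set ra0 ((rb0 : Nat) : Int) := by
    rw [pvAEdge, pvUnion]
    simp only [← hva, ← hvb, ← hxa, ← hxb, ← hp1, ← hp2, hbval, haval]
    rw [PySem.List.pySetD_natCast]
  set la := l.getD (pvIx n xa) 0 with hla
  set lb := l.getD (pvIx n xb) 0 with hlb
  have hBla : PySem.List.pyGetD l xa 0 = la := by
    rw [pvGetD_bridge l n xa 0 hll hxa1 hxa2]
  have hBlb : PySem.List.pyGetD l (xb) 0 = lb := by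
    rw [pvGetD_bridge l n xb 0 hll hxb1 hxb2]
  have hBres : pvBEdge row l i =
      (if la ≠ lb then l.map (fun v => if v = lb then la else v) else l) := by
    rw [pvBEdge]
    simp only [← hva, ← hvb, ← hxa, ← hxb, hBla, hBlb]
  have hlab : la = lb ↔ ra0 = rb0 := by
    rw [hla, hlb, hiff _ _ hia hib, hrfa, hrfb]
  rw [hAres, hBres]
  by_cases hcase : ra0 = rb0
  · -- same class: both sides unchanged
    subst hcase
    have hset : p2.set ra0 ((ra0 : Nat) : Int) = p2 := pvSet_same hfa (by rw [hv2.1]; exact hra0)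
    rw [hset, if_neg (by simp [hlab.mpr rfl])]
    refine ⟨hv2, ?_, hll, ?_⟩
    · intro z hz
      obtain ⟨r, k, h, hk⟩ := htp z hz
      obtain ⟨k', hk', h'⟩ := hT21 z r k h
      exact ⟨r, k', h', by omega⟩
    · intro x y hx hy
      rw [hrP x hx, hrP y hy]
      exact hiff x y hx hy
  · have hlne : la ≠ lb := fun h => hcase (hlab.mp h)
    rw [if_pos hlne]
    obtain ⟨hv3, hNR3, hT3⟩ := pvUnionSet hv2 hra0 hrb0 hfa hfb hcase
    set p3 := p2.set ra0 ((rb0 : Nat) : Int) with hp3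
    have hr3 : ∀ z, z < n →
        pvRootF p3 z = (if pvRootF p z = ra0 then rb0 else pvRootF p z) := by
      intro z hz
      obtain ⟨r, k, h, hk⟩ := htp z hz
      obtain ⟨k', hk', h'⟩ := hT21 z r k h
      obtain ⟨k'', hk'', h''⟩ := hT3 z r k' h'
      rw [pvRootF_eq h'', pvRootF_eq h]
    refine ⟨hv3, ?_, by simp [hll], ?_⟩
    · intro z hz
      obtain ⟨r, k, h, hk⟩ := htp z hz
      obtain ⟨k', hk', h'⟩ := hT21 z r k h
      obtain ⟨k'', hk'', h''⟩ := hT3 z r k' h'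
      refine ⟨_, k'', h'', ?_⟩
      rw [hNR3, hNR2, hNR1]
      omega
    · intro x y hx hy
      rw [pvGetD_map_if l la lb x (by rw [hll]; exact hx), pvGetD_map_if l la lb y (by rw [hll]; exact hy),
        hr3 x hx, hr3 y hy, pvRelabel_iff hlne, pvMerge_iff hcase]
      have e1 := hiff x y hx hy
      have e2 : l.getD x 0 = lb ↔ pvRootF p x = rb0 := by
        rw [hlb, hiff x _ hx hib, hrfb]
      have e3 : l.getD x 0 = la ↔ pvRootF p x = ra0 := by
        rw [hla, hiff x _ hx hia, hrfa]
      have e4 : l.getD y 0 = lb ↔ pvRootF p y = rb0 := by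
        rw [hlb, hiff y _ hy hib, hrfb]
      have e5 : l.getD y 0 = la ↔ pvRootF p y = ra0 := by
        rw [hla, hiff y _ hy hia, hrfa]
      constructor
      · rintro (h | ⟨h1, h2⟩ | ⟨h1, h2⟩)
        · exact Or.inl (e1.mp h)
        · exact Or.inr (Or.inr ⟨e2.mp h1, e5.mp h2⟩)
        · exact Or.inr (Or.inl ⟨e3.mp h1, e4.mp h2⟩)
      · rintro (h | ⟨h1, h2⟩ | ⟨h1, h2⟩)
        · exact Or.inl (e1.mpr h)
        · exact Or.inr (Or.inr ⟨e3.mpr h1, e4.mpr h2⟩)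
        · exact Or.inr (Or.inl ⟨e2.mpr h1, e5.mpr h2⟩)

-- the whole edge loop preserves the joint invariant
lemma pvEdge_fold {n : Nat} {row : List Int} (hrow : row.length = 2 * n)
    (hpre : ∀ x ∈ row, -(row.length : Int) ≤ x ∧ x < (row.length : Int))
    (idxs : List Int) (hidx : ∀ i ∈ idxs, 0 ≤ i ∧ i + 1 < (row.length : Int))
    {p l : List Int} (hJ : pvJInv n p l) :
    pvJInv n (idxs.foldl (pvAEdge row (row.length + 2)) p) (idxs.foldl (pvBEdge row) l) := by
  induction idxs generalizing p l with
  | nil => exact hJ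
  | cons i rest ih =>
      simp only [List.foldl_cons]
      exact ih (fun j hj => hidx j (List.mem_cons_of_mem _ hj))
        (pvEdge_step hrow hpre (hidx i (List.mem_cons_self)).1 (hidx i (List.mem_cons_self)).2 hJ)

-- counting loop: the set collected is the set of (preserved) roots
lemma pvCount_loop {n : Nat} {pf : List Int} (hv : pvValid n pf) (ht : pvTotal n pf)
    (fuel : Nat) (hfuel : n + 2 ≤ fuel) :
    ∀ (m : Nat), m ≤ n →
    pvValid n ((List.range m).foldl (fun (st : List Int × PySem.Set Int) (i : Nat) =>
        ((pvFind fuel st.1 (i : Int)).1, PySem.Set.add st.2 (pvFind fuel st.1 (i : Int)).2))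
      (pf, PySem.Set.empty)).1 ∧
    pvNR ((List.range m).foldl (fun (st : List Int × PySem.Set Int) (i : Nat) =>
        ((pvFind fuel st.1 (i : Int)).1, PySem.Set.add st.2 (pvFind fuel st.1 (i : Int)).2))
      (pf, PySem.Set.empty)).1 = pvNR pf ∧
    (∀ z r k, pvRooted pf z r k →
      ∃ k' ≤ k, pvRooted ((List.range m).foldl (fun (st : List Int × PySem.Set Int) (i : Nat) =>
        ((pvFind fuel st.1 (i : Int)).1, PySem.Set.add st.2 (pvFind fuel st.1 (i : Int)).2))
      (pf, PySem.Set.empty)).1 z r k') ∧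
    ((List.range m).foldl (fun (st : List Int × PySem.Set Int) (i : Nat) =>
        ((pvFind fuel st.1 (i : Int)).1, PySem.Set.add st.2 (pvFind fuel st.1 (i : Int)).2))
      (pf, PySem.Set.empty)).2 =
      PySem.Set.ofList ((List.range m).map (fun i => ((pvRootF pf i : Nat) : Int))) := by
  intro m
  induction m with
  | zero =>
      intro _
      exact ⟨hv, rfl, fun z r k h => ⟨k, le_refl _, h⟩, by simp [PySem.Set.empty]⟩
  | succ m ih =>
      intro hm
      obtain ⟨hvm, hNRm, hTm, hSm⟩ := ih (by omega)
      set st := (List.range m).foldl (fun (st : List Int × PySem.Set Int) (i : Nat) =>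
        ((pvFind fuel st.1 (i : Int)).1, PySem.Set.add st.2 (pvFind fuel st.1 (i : Int)).2))
        (pf, PySem.Set.empty) with hst
      rw [List.range_succ, List.foldl_append, List.foldl_cons, List.foldl_nil]
      obtain ⟨r, k, h, hk⟩ := ht m (by omega)
      obtain ⟨k', hk', h'⟩ := hTm m r k h
      have hixm : pvIx n ((m : Nat) : Int) = m := by
        unfold pvIx; rw [if_pos (by positivity)]; omega
      have hNRpf : pvNR pf ≤ n := hv.1 ▸ pvNR_le pf
      obtain ⟨hval, hvf, hNRf, hTf⟩ := pvFind_spec k' st.1 ((m : Nat) : Int) r fuel n hvm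
        (by omega) (by exact_mod_cast (by omega : m < n)) (hixm ▸ h') (by omega)
      refine ⟨hvf, by rw [hNRf, hNRm], ?_, ?_⟩
      · intro z r' k0 h0
        obtain ⟨k1, hk1, h1⟩ := hTm z r' k0 h0
        obtain ⟨k2, hk2, h2⟩ := hTf z r' k1 h1
        exact ⟨k2, by omega, h2⟩
      · show PySem.Set.add st.2 (pvFind fuel st.1 ((m : Nat) : Int)).2 = _
        rw [hval, hSm]
        simp only [List.map_append, List.map_cons, List.map_nil,
          PySem.Set.ofList_append_singleton]
        rw [pvRootF_eq h]

-- two functions equal up to relabeling have the same number of distinct values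
lemma pvCard_congr (f g : Nat → Int) :
    ∀ (m : Nat), (∀ i j, i < m → j < m → (f i = f j ↔ g i = g j)) →
    (PySem.Set.ofList ((List.range m).map f)).length =
    (PySem.Set.ofList ((List.range m).map g)).length := by
  intro m
  induction m with
  | zero => intro _; rfl
  | succ m ih =>
      intro h
      have ihm := ih (fun i j hi hj => h i j (by omega) (by omega))
      simp only [List.range_succ, List.map_append, List.map_cons, List.map_nil,
        PySem.Set.ofList_append_singleton]
      have hmem : f m ∈ PySem.Set.ofList ((List.range m).map f) ↔
          g m ∈ PySem.Set.ofList ((List.range m).map g) := by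
        rw [PySem.Set.mem_ofList, PySem.Set.mem_ofList]
        simp only [List.mem_map, List.mem_range]
        constructor
        · rintro ⟨i, hi, hfi⟩
          exact ⟨i, hi, (h i m (by omega) (by omega)).mp hfi⟩
        · rintro ⟨i, hi, hgi⟩
          exact ⟨i, hi, (h i m (by omega) (by omega)).mpr hgi⟩
      by_cases hin : f m ∈ PySem.Set.ofList ((List.range m).map f)
      · rw [PySem.Set.add_of_mem hin, PySem.Set.add_of_mem (hmem.mp hin), ihm]
      · rw [PySem.Set.add_of_not_mem hin, PySem.Set.add_of_not_mem (fun hc => hin (hmem.mpr hc))]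
        simp [ihm]

-- ===== VERDICT (by name: the statement is the Claim_ definition above) =====
theorem solve_spec : Claim_equal_solve := by
  intro row _ hpre
  obtain ⟨hev, hbnd⟩ := hpre
  show solve row = solve_alt row
  simp only [solve, solve_alt, PySem.List.len_eq, PySem.Set.len]
  set n := row.length / 2 with hn
  have hL : row.length = 2 * n := by omega
  set p0 : List Int := (List.range n).map (fun k => Int.ofNat k) with hp0
  have hp0len : p0.length = n := by rw [hp0]; simp
  have hp0get : ∀ i : Nat, i < n → p0.getD i 0 = (i : Int) := by
    intro i hi
    rw [hp0]
    simp [List.getD_eq_getElem?_getD, hi]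
  have hv0 : pvValid n p0 := ⟨hp0len, fun i hi => ⟨i, hi, hp0get i hi⟩⟩
  have hroot0 : ∀ i : Nat, i < n → pvRooted p0 i i 0 :=
    fun i hi => pvRooted.self i (hp0get i hi)
  have ht0 : pvTotal n p0 := fun i hi => ⟨i, 0, hroot0 i hi, by omega⟩
  have hJ0 : pvJInv n p0 p0 := by
    refine ⟨hv0, ht0, hp0len, ?_⟩
    intro x y hx hy
    rw [pvRootF_eq (hroot0 x hx), pvRootF_eq (hroot0 y hy), hp0get x hx, hp0get y hy]
    exact ⟨fun h => by exact_mod_cast h, fun h => by exact_mod_cast h⟩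
  set idxs := PySem.List.pyRange 0 (row.length : Int) 2 with hidxs
  have hidx : ∀ i ∈ idxs, 0 ≤ i ∧ i + 1 < (row.length : Int) := by
    intro i hi
    rw [hidxs, PySem.List.mem_pyRange_iff_of_pos (by omega)] at hi
    obtain ⟨h1, h2, c, hc⟩ := hi
    omega
  obtain ⟨hvf, htf, hlenf, hifff⟩ := pvEdge_fold hL hbnd idxs hidx hJ0
  set pf := idxs.foldl (pvAEdge row (row.length + 2)) p0 with hpf
  set lf := idxs.foldl (pvBEdge row) p0 with hlf
  obtain ⟨_, _, _, hS⟩ := pvCount_loop hvf htf (row.length + 2) (by omega) n (le_refl n)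
  rw [hS]
  have hlfmap : lf = (List.range n).map (fun i => lf.getD i 0) := by
    apply List.ext_getElem (by simp [hlenf])
    intro j hj hj'
    have hj2 : j < n := by simpa [hlenf] using hj
    simp [List.getD_eq_getElem?_getD, List.getElem?_eq_getElem hj]
  rw [hlfmap]
  have hcard := pvCard_congr (fun i => ((pvRootF pf i : Nat) : Int)) (fun i => lf.getD i 0) n
    (by
      intro i j hi hj
      show ((pvRootF pf i : Nat) : Int) = ((pvRootF pf j : Nat) : Int) ↔ _
      rw [Int.natCast_inj]
      exact ((hifff i j hi hj).symm))
  rw [hcard]
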